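-- pv_equiv track=rewrite | github.com/Harborrrr/ABU-Robocon-2024 | Utils/cam_for_depth/history.py | digitArray
-- ===== SOURCE A (Python) =====
-- def digitArray(num):  # 为串口返回列表数组
--     array = [0, 0, 0, 0,
--              0]  # 1位：符号、校验位 ； 2位：yaw的千位 ：3为：yaw百位 类推     1负2正3错误4成功
--     digitArray = [int(digit) for digit in str(abs(num))]
--     lenth = len(digitArray)
--     if lenth > 4:
--         array = [3, 0, 0, 0, 0]  # 若数组长度大于4,说明yaw结算出错，返回首位为3的数组
--         return array
--     else:
--         if num < 0:
--             array[0] = 1  # 若小于0,返回的数组首位为1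
--             for i in range(lenth):
--                 array[4 - i] = digitArray[lenth - 1 - i]
--             return array
--         else:
--             array[0] = 2  # 若大于0,返回的数组首位为2
--             for i in range(lenth):
--                 array[4 - i] = digitArray[lenth - 1 - i]
--             return array
-- ===== SOURCE B (Python) =====
-- def digitArray(num):  # arithmetic digit peeling instead of string conversion
--     n = abs(num)
--     if n >= 10000:
--         return [3, 0, 0, 0, 0]
--     res = [1 if num < 0 else 2, 0, 0, 0, 0]
--     i = 4
--     while n > 0:
--         n, d = divmod(n, 10)
--         res[i] = d
--         i -= 1
--     return res
-- ===== Notes on version B (the rewrite author's own statement) =====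
-- stated objective: simpler
-- what changed: B replaces A's str(abs(num)) conversion, per-char int() parsing, length measurement and index-juggling copy loop by direct arithmetic digit peeling with divmod into a preallocated five-slot result list.
import Mathlib
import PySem

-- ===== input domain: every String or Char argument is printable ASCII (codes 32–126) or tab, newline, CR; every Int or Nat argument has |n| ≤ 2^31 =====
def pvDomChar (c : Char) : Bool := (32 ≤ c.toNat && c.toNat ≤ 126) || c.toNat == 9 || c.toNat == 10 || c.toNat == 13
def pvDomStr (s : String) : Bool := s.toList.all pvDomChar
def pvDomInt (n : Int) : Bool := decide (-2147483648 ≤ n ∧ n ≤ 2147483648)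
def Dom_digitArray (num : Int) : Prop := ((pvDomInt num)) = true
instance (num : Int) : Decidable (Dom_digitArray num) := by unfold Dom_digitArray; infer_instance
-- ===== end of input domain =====

-- B replaces A's string-conversion + copy-loop decomposition by arithmetic divmod digit peeling (objective: simpler).

-- ===== PORT A =====
def digitArray (num : Int) : List Int :=
  let array : List Int := [0, 0, 0, 0, 0]
  -- int(digit): exact here, str(abs(num)) contains only the chars '0'..'9', whose int value is code - 48
  let digitArr : List Int := (PySem.Int.toChars |num|).map (fun c => ((c.toNat : Int) - 48))
  let lenth : Int := (digitArr.length : Int)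
  if lenth > 4 then
    [3, 0, 0, 0, 0]
  else
    if num < 0 then
      let array := array.set 0 1
      -- array[4-i] = digitArray[lenth-1-i]: both indices are in range (0 ≤ i < lenth ≤ 4), so .toNat / pyGetD are exact
      (PySem.List.pyRange 0 lenth 1).foldl
        (fun a i => a.set (4 - i).toNat (PySem.List.pyGetD digitArr (lenth - 1 - i) 0)) array
    else
      let array := array.set 0 2
      (PySem.List.pyRange 0 lenth 1).foldl
        (fun a i => a.set (4 - i).toNat (PySem.List.pyGetD digitArr (lenth - 1 - i) 0)) array

-- ===== PORT B =====
-- the 'while n > 0' loop of Source B, made structural by a fuel argument: at entry n < 10000, so it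
-- iterates at most 4 times and fuel 5 is an honest bound
def pyPeel : Nat → Int → Nat → List Int → List Int
  | 0, _, _, res => res
  | f + 1, n, i, res =>
    if 0 < n then
      pyPeel f (PySem.Int.floordiv n 10) (i - 1) (res.set i (PySem.Int.mod n 10))
    else res

def digitArray_alt (num : Int) : List Int :=
  let n : Int := |num|
  if 10000 ≤ n then [3, 0, 0, 0, 0]
  else pyPeel 5 n 4 [if num < 0 then 1 else 2, 0, 0, 0, 0]

-- ===== PRECONDITION & SPEC =====
def Spec_digitArray (num : Int) (out : List Int) : Prop := out = digitArray_alt num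
instance (num : Int) (out : List Int) : Decidable (Spec_digitArray num out) := by unfold Spec_digitArray; infer_instance

-- ===== CLAIM (what is proved, stated in full; the proofs are below) =====
def Claim_equal_digitArray : Prop := ∀ (num : Int), Dom_digitArray num → Spec_digitArray num (digitArray num)

-- ===== LEMMAS AND PROOFS =====

-- Nat.toDigitsCore: the accumulator is just appended
lemma toDigitsCore_acc (f : Nat) : ∀ (n : Nat) (acc : List Char),
    Nat.toDigitsCore 10 f n acc = Nat.toDigitsCore 10 f n [] ++ acc := by
  induction f with
  | zero => intro n acc; simp [Nat.toDigitsCore]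
  | succ f ih =>
    intro n acc
    simp only [Nat.toDigitsCore]
    by_cases h : n / 10 = 0
    · simp [h]
    · simp only [h, if_false]
      rw [ih (n / 10) ([Nat.digitChar (n % 10)]), ih (n / 10) (Nat.digitChar (n % 10) :: acc),
        List.append_assoc]
      rfl

-- Nat.toDigitsCore: any sufficient fuel gives the same result
lemma toDigitsCore_fuel : ∀ (n f1 f2 : Nat) (acc : List Char), n < f1 → n < f2 →
    Nat.toDigitsCore 10 f1 n acc = Nat.toDigitsCore 10 f2 n acc := by
  intro n
  induction n using Nat.strong_induction_on with
  | _ n ih =>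
    intro f1 f2 acc h1 h2
    obtain ⟨g1, rfl⟩ := Nat.exists_eq_add_of_lt h1
    obtain ⟨g2, rfl⟩ := Nat.exists_eq_add_of_lt h2
    simp only [Nat.add_comm n 1, Nat.add_assoc, Nat.toDigitsCore]
    by_cases h : n / 10 = 0
    · simp [Nat.add_comm, h]
    · have hn10 : n / 10 < n := Nat.div_lt_self (Nat.pos_of_ne_zero (by
        intro h0; subst h0; simp at h)) (by norm_num)
      have hb1 : n / 10 < n + g1 := lt_of_lt_of_le hn10 (Nat.le_add_right _ _)
      have hb2 : n / 10 < n + g2 := lt_of_lt_of_le hn10 (Nat.le_add_right _ _)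
      simp only [Nat.add_comm, h, if_false]
      exact ih (n / 10) hn10 _ _ _ (by omega) (by omega)

lemma toDigits_lt (n : Nat) (h : n < 10) : Nat.toDigits 10 n = [Nat.digitChar n] := by
  have h10 : n / 10 = 0 := Nat.div_eq_of_lt h
  have hm : n % 10 = n := Nat.mod_eq_of_lt h
  simp [Nat.toDigits, Nat.toDigitsCore, h10, hm]

lemma toDigitsCore_step (f n : Nat) (acc : List Char) (h : n / 10 ≠ 0) :
    Nat.toDigitsCore 10 (f + 1) n acc
      = Nat.toDigitsCore 10 f (n / 10) (Nat.digitChar (n % 10) :: acc) := by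
  simp only [Nat.toDigitsCore, h, if_false]

lemma toDigits_rec (n : Nat) (h : 10 ≤ n) :
    Nat.toDigits 10 n = Nat.toDigits 10 (n / 10) ++ [Nat.digitChar (n % 10)] := by
  have h10 : n / 10 ≠ 0 := by
    intro h0; have := Nat.lt_of_div_eq_zero (by norm_num) h0; omega
  have hn10 : n / 10 < n := Nat.div_lt_self (by omega) (by norm_num)
  show Nat.toDigitsCore 10 (n + 1) n [] = _
  rw [toDigitsCore_step n n [] h10, toDigitsCore_acc,
    toDigitsCore_fuel (n / 10) n (n / 10 + 1) [] hn10 (Nat.lt_succ_self _)]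
  rfl

-- the char-to-int map A applies to each digit char
lemma digitChar_val (d : Nat) (h : d < 10) : ((Nat.digitChar d).toNat : Int) - 48 = (d : Int) := by
  interval_cases d <;> decide

-- decimal digit lists of the four magnitude buckets, already mapped to Int
lemma digs1 (n : Nat) (h : n < 10) :
    (Nat.toDigits 10 n).map (fun c => ((c.toNat : Int) - 48)) = [(n : Int)] := by
  rw [toDigits_lt n h]; simp [digitChar_val n h]

lemma digs2 (n : Nat) (h1 : 10 ≤ n) (h2 : n < 100) :
    (Nat.toDigits 10 n).map (fun c => ((c.toNat : Int) - 48))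
      = [((n / 10 : Nat) : Int), ((n % 10 : Nat) : Int)] := by
  rw [toDigits_rec n h1, List.map_append, digs1 (n / 10) (by omega)]
  simp [digitChar_val (n % 10) (by omega)]

lemma digs3 (n : Nat) (h1 : 100 ≤ n) (h2 : n < 1000) :
    (Nat.toDigits 10 n).map (fun c => ((c.toNat : Int) - 48))
      = [((n / 100 : Nat) : Int), ((n / 10 % 10 : Nat) : Int), ((n % 10 : Nat) : Int)] := by
  rw [toDigits_rec n (by omega), List.map_append, digs2 (n / 10) (by omega) (by omega)]
  simp [digitChar_val (n % 10) (by omega), Nat.div_div_eq_div_mul]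

lemma digs4 (n : Nat) (h1 : 1000 ≤ n) (h2 : n < 10000) :
    (Nat.toDigits 10 n).map (fun c => ((c.toNat : Int) - 48))
      = [((n / 1000 : Nat) : Int), ((n / 100 % 10 : Nat) : Int),
         ((n / 10 % 10 : Nat) : Int), ((n % 10 : Nat) : Int)] := by
  rw [toDigits_rec n (by omega), List.map_append, digs3 (n / 10) (by omega) (by omega)]
  simp [digitChar_val (n % 10) (by omega), Nat.div_div_eq_div_mul]

-- lower bound on the digit-string length, for the overflow branch
lemma toDigitsCore_len_ge : ∀ (f n e : Nat), n < f → 10 ^ e ≤ n →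
    e + 1 ≤ (Nat.toDigitsCore 10 f n []).length := by
  intro f
  induction f with
  | zero => intro n e h _; omega
  | succ f ih =>
    intro n e h he
    simp only [Nat.toDigitsCore]
    by_cases h10 : n / 10 = 0
    · have hn : n < 10 := Nat.lt_of_div_eq_zero (by norm_num) h10
      have : e = 0 := by
        by_contra h0
        have : 10 ≤ 10 ^ e := Nat.le_self_pow h0 10
        omega
      simp [h10, this]
    · simp only [h10, if_false]
      rw [toDigitsCore_acc]
      simp only [List.length_append, List.length_singleton]
      cases e with
      | zero => omega
      | succ e =>
        have hn10 : n / 10 < n := Nat.div_lt_self (by omega) (by norm_num)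
        have : 10 ^ e ≤ n / 10 := by
          rw [Nat.le_div_iff_mul_le (by norm_num)]
          calc 10 ^ e * 10 = 10 ^ (e + 1) := by ring
          _ ≤ n := he
        have := ih (n / 10) e (by omega) this
        omega

-- the common value of both programs for 0 < n < 10000 (s is the sign mark)
def canon (n : Nat) (s : Int) : List Int :=
  [s, ((n / 1000 : Nat) : Int), ((n / 100 % 10 : Nat) : Int),
   ((n / 10 % 10 : Nat) : Int), ((n % 10 : Nat) : Int)]

-- cast helpers used when evaluating both ports on a Nat-cast argument
lemma fd (m : Nat) : PySem.Int.floordiv ((m : Nat) : Int) 10 = ((m / 10 : Nat) : Int) := by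
  exact_mod_cast PySem.Int.floordiv_natCast m 10

lemma md (m : Nat) : PySem.Int.mod ((m : Nat) : Int) 10 = ((m % 10 : Nat) : Int) := by
  exact_mod_cast PySem.Int.mod_natCast m 10

-- A's branch for |num| = n, 0 < n < 10000, evaluates to canon
lemma A_small (num : Int) (n : Nat) (habs : |num| = (n : Int)) (h1 : 0 < n) (h2 : n < 10000) :
    digitArray num = canon n (if num < 0 then 1 else 2) := by
  unfold digitArray
  rw [habs]
  simp only [PySem.Int.toChars, show ¬((n : Int) < 0) from by omega, if_false, Int.toNat_natCast]
  have hr1 : PySem.List.pyRange 0 1 1 = [0] := by decide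
  have hr2 : PySem.List.pyRange 0 2 1 = [0, 1] := by decide
  have hr3 : PySem.List.pyRange 0 3 1 = [0, 1, 2] := by decide
  have hr4 : PySem.List.pyRange 0 4 1 = [0, 1, 2, 3] := by decide
  rcases (by omega : n < 10 ∨ (10 ≤ n ∧ n < 100) ∨ (100 ≤ n ∧ n < 1000) ∨ (1000 ≤ n ∧ n < 10000))
    with h | ⟨ha, hb⟩ | ⟨ha, hb⟩ | ⟨ha, hb⟩
  · rw [digs1 n h]
    have e1 : n / 1000 = 0 := by omega
    have e2 : n / 100 = 0 := by omega
    have e3 : n / 10 = 0 := by omega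
    have e4 : n % 10 = n := by omega
    by_cases hneg : num < 0 <;>
      norm_num [hneg, canon, e1, e2, e3, e4, hr1, show Int.toNat 4 = 4 from rfl, show Int.toNat 3 = 3 from rfl,
        show Int.toNat 2 = 2 from rfl, show Int.toNat 1 = 1 from rfl,
        PySem.List.pyGetD, PySem.List.pyIdx?, PySem.List.pyGet?]
  · rw [digs2 n ha hb]
    have e1 : n / 1000 = 0 := by omega
    have e2 : n / 100 = 0 := by omega
    have e3 : n / 10 % 10 = n / 10 := by omega
    by_cases hneg : num < 0 <;>
      norm_num [hneg, canon, e1, e2, e3, hr2, show Int.toNat 4 = 4 from rfl, show Int.toNat 3 = 3 from rfl,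
        show Int.toNat 2 = 2 from rfl, show Int.toNat 1 = 1 from rfl,
        PySem.List.pyGetD, PySem.List.pyIdx?, PySem.List.pyGet?]
  · rw [digs3 n ha hb]
    have e1 : n / 1000 = 0 := by omega
    have e2 : n / 100 % 10 = n / 100 := by omega
    by_cases hneg : num < 0 <;>
      norm_num [hneg, canon, e1, e2, hr3, show Int.toNat 4 = 4 from rfl, show Int.toNat 3 = 3 from rfl,
        show Int.toNat 2 = 2 from rfl, show Int.toNat 1 = 1 from rfl,
        PySem.List.pyGetD, PySem.List.pyIdx?, PySem.List.pyGet?]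
  · rw [digs4 n ha hb]
    have e1 : n / 1000 % 10 = n / 1000 := by omega
    by_cases hneg : num < 0 <;>
      norm_num [hneg, canon, e1, hr4, show Int.toNat 4 = 4 from rfl, show Int.toNat 3 = 3 from rfl,
        show Int.toNat 2 = 2 from rfl, show Int.toNat 1 = 1 from rfl,
        PySem.List.pyGetD, PySem.List.pyIdx?, PySem.List.pyGet?]

-- B's peel loop for |num| = n, 0 < n < 10000, evaluates to canon
lemma B_small (num : Int) (n : Nat) (habs : |num| = (n : Int)) (h1 : 0 < n) (h2 : n < 10000) :
    digitArray_alt num = canon n (if num < 0 then 1 else 2) := by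
  unfold digitArray_alt
  rw [habs]
  simp only [show ¬((10000 : Int) ≤ (n : Int)) from by omega, if_false]
  rcases (by omega : n < 10 ∨ (10 ≤ n ∧ n < 100) ∨ (100 ≤ n ∧ n < 1000) ∨ (1000 ≤ n ∧ n < 10000))
    with h | ⟨ha, hb⟩ | ⟨ha, hb⟩ | ⟨ha, hb⟩
  · have e1 : n / 1000 = 0 := by omega
    have e2 : n / 100 = 0 := by omega
    have e3 : n / 10 = 0 := by omega
    have e4 : n % 10 = n := by omega
    by_cases hneg : num < 0 <;>
      simp [hneg, pyPeel, canon, fd, md, Int.natCast_pos, Nat.div_div_eq_div_mul,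
        show (0 : Int) < (n : Int) from by omega, e1, e2, e3, e4, h1] <;>
      (split_ifs <;> simp only [List.cons.injEq, and_true, true_and] <;> omega)
  · have e1 : n / 1000 = 0 := by omega
    have e2 : n / 100 = 0 := by omega
    have e3 : 0 < n / 10 := by omega
    by_cases hneg : num < 0 <;>
      simp [hneg, pyPeel, canon, fd, md, Int.natCast_pos, Nat.div_div_eq_div_mul,
        show (0 : Int) < (n : Int) from by omega, e1, e2, e3, h1] <;>
      (split_ifs <;> simp only [List.cons.injEq, and_true, true_and] <;> omega)
  · have e1 : n / 1000 = 0 := by omega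
    have e2 : 0 < n / 100 := by omega
    have e3 : 0 < n / 10 := by omega
    by_cases hneg : num < 0 <;>
      simp [hneg, pyPeel, canon, fd, md, Int.natCast_pos, Nat.div_div_eq_div_mul,
        show (0 : Int) < (n : Int) from by omega, e1, e2, e3, h1] <;>
      (split_ifs <;> simp only [List.cons.injEq, and_true, true_and] <;> omega)
  · have e1 : 0 < n / 1000 := by omega
    have e2 : 0 < n / 100 := by omega
    have e3 : 0 < n / 10 := by omega
    have e4 : n / 10000 = 0 := by omega
    by_cases hneg : num < 0 <;>
      simp [hneg, pyPeel, canon, fd, md, Int.natCast_pos, Nat.div_div_eq_div_mul,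
        show (0 : Int) < (n : Int) from by omega, e1, e2, e3, e4, h1] <;>
      (split_ifs <;> simp only [List.cons.injEq, and_true, true_and] <;> omega)

-- both programs return the error array once |num| has five or more digits
lemma big_case (num : Int) (h : 10000 ≤ num.natAbs) :
    digitArray num = [3, 0, 0, 0, 0] ∧ digitArray_alt num = [3, 0, 0, 0, 0] := by
  constructor
  · unfold digitArray
    have habs : |num| = (num.natAbs : Int) := by rw [Int.abs_eq_natAbs]
    rw [habs]
    simp only [PySem.Int.toChars, show ¬((num.natAbs : Int) < 0) from by omega, if_false,
      Int.toNat_natCast]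
    have hlen : 5 ≤ (Nat.toDigits 10 num.natAbs).length :=
      toDigitsCore_len_ge (num.natAbs + 1) num.natAbs 4 (Nat.lt_succ_self _) (by norm_num; omega)
    have : ((((Nat.toDigits 10 num.natAbs).map fun c => ((c.toNat : Int) - 48)).length : Int)) > 4 := by
      rw [List.length_map]; omega
    simp only [this, if_true]
  · unfold digitArray_alt
    have : (10000 : Int) ≤ |num| := by rw [Int.abs_eq_natAbs]; omega
    simp [this]

-- ===== VERDICT (by name: the statement is the Claim_ definition above) =====
theorem digitArray_spec : Claim_equal_digitArray := by
  unfold Claim_equal_digitArray Spec_digitArray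
  intro num _
  by_cases hbig : 10000 ≤ num.natAbs
  · have := big_case num hbig
    rw [this.1, this.2]
  · rw [not_le] at hbig
    by_cases h0 : num = 0
    · subst h0; decide
    · have h1 : 0 < num.natAbs := Int.natAbs_pos.mpr h0
      have habs : |num| = (num.natAbs : Int) := by rw [Int.abs_eq_natAbs]
      rw [A_small num num.natAbs habs h1 hbig, B_small num num.natAbs habs h1 hbig]
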